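-- pv_equiv track=rewrite | github.com/M20190649/neural-bus-networks | python/test.py | numFullRoutes
-- ===== SOURCE A (Python) =====
-- def numFullRoutes(lst):
--     first_stop = 6
--     last_stop = 28
--     start_index = 0
--     total =0
--     while first_stop in lst:
--         i = lst.index(first_stop)
--         if i+(last_stop-first_stop)<=len(lst):
--             if lst[i:i+(last_stop-first_stop)] == range(first_stop,last_stop):
--                 total+=1
--         start_index=i+1
--         lst = lst[start_index:]
--     return total
-- ===== SOURCE B (Python) =====
-- def numFullRoutes(lst):
--     block = list(range(6, 28))
--     k = len(block)
--     total = 0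
--     for j in range(len(lst) - k + 1):
--         if lst[j:j+k] == block:
--             total += 1
--     return total
-- ===== Notes on version B (the rewrite author's own statement) =====
-- stated objective: alternative
-- what changed: Replaced the while/index/re-slice scan (which compares each slice to a range object, so it never counts anything) by a single fixed-length sliding-window count over all start positions.
-- intended difference: On lists containing the contiguous block [6,7,...,27] A returns 0 because Python 3 evaluates `list == range(...)` as False, while B returns the number of occurrences of the block, which is what the function is meant to count. — e.g. on numFullRoutes([6, 7, 8, 9, 10, 11, 12, 13, 14, 15, 16, 17, 18, 19, 20, 21, 22, 23, 24, 25, 26, 27]): A returns 0, B returns 1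
import Mathlib
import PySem

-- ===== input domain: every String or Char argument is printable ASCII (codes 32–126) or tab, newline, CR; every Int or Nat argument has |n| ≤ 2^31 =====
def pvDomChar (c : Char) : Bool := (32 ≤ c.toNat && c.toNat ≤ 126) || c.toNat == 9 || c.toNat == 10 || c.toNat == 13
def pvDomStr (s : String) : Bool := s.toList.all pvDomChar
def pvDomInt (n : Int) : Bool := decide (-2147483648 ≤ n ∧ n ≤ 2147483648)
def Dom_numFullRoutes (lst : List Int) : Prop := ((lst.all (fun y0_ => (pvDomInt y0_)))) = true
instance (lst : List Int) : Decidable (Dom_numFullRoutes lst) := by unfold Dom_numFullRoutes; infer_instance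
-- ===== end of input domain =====

-- B counts occurrences of the full block [6..27] with a single fixed-window scan; A's
-- `lst[i:i+22] == range(6,28)` compares a list to a range object (always False in Python 3),
-- so A returns 0 on every input — stated below as the intended difference D_.

-- ===== PORT A =====
-- Python 3: `list == range` is always False, whatever the elements; exact.
def pyListEqRange (_xs : List Int) (_a _b : Int) : Bool := false

def numFullRoutesGo (lst : List Int) (total : Int) : Int :=
  if _h6 : (6 : Int) ∈ lst then
    match hi : PySem.List.index? lst (6 : Int) with
    | none => total       -- unreachable: 6 ∈ lst
    | some i =>
      let total' :=
        if (i : Int) + (28 - 6) ≤ (lst.length : Int) then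
          (if pyListEqRange (PySem.List.slice lst (some (i : Int)) (some ((i : Int) + (28 - 6)))) 6 28
           then total + 1 else total)
        else total
      numFullRoutesGo (PySem.List.slice lst (some ((i : Int) + 1)) none) total'
  else total
termination_by lst.length
decreasing_by
  rw [PySem.List.slice_from lst (by omega)]
  have hne : lst ≠ [] := by rintro rfl; simp at _h6
  have hpos : 0 < lst.length := List.length_pos_iff.mpr hne
  simp only [List.length_drop]
  omega

def numFullRoutes (lst : List Int) : Int := numFullRoutesGo lst 0

-- ===== PORT B =====
def numFullRoutesBlock : List Int := PySem.List.pyRange 6 28 1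

def numFullRoutes_alt (lst : List Int) : Int :=
  let block := numFullRoutesBlock
  let k : Int := block.length
  (PySem.List.pyRange 0 ((lst.length : Int) - k + 1) 1).foldl
    (fun total j =>
      if PySem.List.slice lst (some j) (some (j + k)) = block then total + 1 else total) 0

-- ===== PRECONDITION & SPEC =====
-- On inputs containing the contiguous block [6,7,…,27], A returns 0 (its list-vs-range
-- comparison is always False in Python 3) while B returns the number of occurrences of the
-- block, which is the count the function's name and structure intend.
def D_numFullRoutes (lst : List Int) : Prop := PySem.List.pyRange 6 28 1 <:+: lst
instance (lst : List Int) : Decidable (D_numFullRoutes lst) := by unfold D_numFullRoutes; infer_instance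

def Spec_numFullRoutes (lst : List Int) (out : Int) : Prop :=
  ¬ D_numFullRoutes lst → out = numFullRoutes_alt lst
instance (lst : List Int) (out : Int) : Decidable (Spec_numFullRoutes lst out) := by unfold Spec_numFullRoutes; infer_instance

def pvDiffWitness_numFullRoutes : List Int :=
  [6, 7, 8, 9, 10, 11, 12, 13, 14, 15, 16, 17, 18, 19, 20, 21, 22, 23, 24, 25, 26, 27]
def pvDiffWitnessOut_numFullRoutes : Int × Int := (0, 1)

-- ===== CLAIM (what is proved, stated in full; the proofs are below) =====
def Claim_unchanged_numFullRoutes : Prop := ∀ (lst : List Int), Dom_numFullRoutes lst → Spec_numFullRoutes lst (numFullRoutes lst)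
def Claim_changed_numFullRoutes : Prop := Dom_numFullRoutes (pvDiffWitness_numFullRoutes) ∧ D_numFullRoutes (pvDiffWitness_numFullRoutes) ∧ numFullRoutes (pvDiffWitness_numFullRoutes) = pvDiffWitnessOut_numFullRoutes.1 ∧ numFullRoutes_alt (pvDiffWitness_numFullRoutes) = pvDiffWitnessOut_numFullRoutes.2 ∧ pvDiffWitnessOut_numFullRoutes.1 ≠ pvDiffWitnessOut_numFullRoutes.2
def Claim_exact_numFullRoutes : Prop := ∀ (lst : List Int), Dom_numFullRoutes lst → D_numFullRoutes lst → numFullRoutes lst ≠ numFullRoutes_alt lst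

-- ===== LEMMAS AND PROOFS =====

theorem numFullRoutesGo_eq (lst : List Int) (total : Int) : numFullRoutesGo lst total = total := by
  have main : ∀ (n : Nat) (lst : List Int) (total : Int), lst.length ≤ n →
      numFullRoutesGo lst total = total := by
    intro n
    induction n with
    | zero =>
      intro lst total h
      have : lst = [] := List.eq_nil_of_length_eq_zero (by omega)
      subst this
      rw [numFullRoutesGo]
      simp
    | succ n ih =>
      intro lst total h
      rw [numFullRoutesGo]
      split
      case isFalse => rfl
      case isTrue h6 =>
        split
        case h_1 => rfl
        case h_2 i hi =>
          simp only [pyListEqRange, Bool.false_eq_true, if_false, ite_self]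
          apply ih
          rw [PySem.List.slice_from lst (by omega)]
          have hne : lst ≠ [] := by rintro rfl; simp at h6
          have hpos : 0 < lst.length := List.length_pos_iff.mpr hne
          simp only [List.length_drop]
          omega
  exact main lst.length lst total le_rfl

theorem numFullRoutesA_eq_zero (lst : List Int) : numFullRoutes lst = 0 := by
  simpa [numFullRoutes] using numFullRoutesGo_eq lst 0

theorem block_len : numFullRoutesBlock.length = 22 := by decide

theorem alt_eq_countP (lst : List Int) :
    numFullRoutes_alt lst =
      ((PySem.List.pyRange 0 ((lst.length : Int) - 21) 1).countP
        (fun j => decide (PySem.List.slice lst (some j) (some (j + 22)) = numFullRoutesBlock)) : Int) := by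
  simp only [numFullRoutes_alt]
  rw [block_len]
  have harg : ((lst.length : Int) - ((22 : Nat) : Int) + 1) = (lst.length : Int) - 21 := by
    push_cast; omega
  rw [harg, PySem.List.foldl_ite_add_one
    (fun j => PySem.List.slice lst (some j) (some (j + ((22 : Nat) : Int))) = numFullRoutesBlock)]
  push_cast
  ring

theorem slice_eq_block_infix {lst : List Int} {j : Int} (h0 : 0 ≤ j)
    (h : PySem.List.slice lst (some j) (some (j + 22)) = numFullRoutesBlock) :
    numFullRoutesBlock <:+: lst := by
  rw [PySem.List.slice_toNat lst h0 (by omega)] at h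
  have h22 : (j + 22).toNat - j.toNat = 22 := by omega
  rw [h22] at h
  have hpre : numFullRoutesBlock <+: lst.drop j.toNat := h ▸ List.take_prefix _ _
  exact hpre.isInfix.trans (List.drop_suffix _ _).isInfix

theorem alt_eq_zero_of_not_infix {lst : List Int} (h : ¬ numFullRoutesBlock <:+: lst) :
    numFullRoutes_alt lst = 0 := by
  rw [alt_eq_countP]
  have : (PySem.List.pyRange 0 ((lst.length : Int) - 21) 1).countP
      (fun j => decide (PySem.List.slice lst (some j) (some (j + 22)) = numFullRoutesBlock)) = 0 := by
    rw [List.countP_eq_zero]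
    intro j hj
    have h0 : 0 ≤ j := (PySem.List.mem_pyRange_one.mp hj).1
    simp only [decide_eq_true_eq]
    exact fun hs => h (slice_eq_block_infix h0 hs)
  rw [this]; rfl

theorem alt_pos_of_infix {lst : List Int} (h : numFullRoutesBlock <:+: lst) :
    0 < numFullRoutes_alt lst := by
  obtain ⟨t, s, rfl⟩ := h
  rw [alt_eq_countP]
  have hcnt : 0 < (List.countP
      (fun j => decide (PySem.List.slice (t ++ numFullRoutesBlock ++ s) (some j) (some (j + 22)) = numFullRoutesBlock))
      (PySem.List.pyRange 0 (((t ++ numFullRoutesBlock ++ s).length : Int) - 21) 1)) := by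
    rw [List.countP_pos_iff]
    refine ⟨(t.length : Int), ?_, ?_⟩
    · rw [PySem.List.mem_pyRange_one]
      constructor
      · positivity
      · simp [List.length_append, block_len]; omega
    · have h0 : (0:Int) ≤ (t.length : Int) := by positivity
      rw [decide_eq_true_eq, PySem.List.slice_toNat _ h0 (by omega)]
      have h22 : ((t.length : Int) + 22).toNat - (t.length : Int).toNat = 22 := by omega
      rw [h22, Int.toNat_natCast, List.append_assoc, List.drop_left]
      exact List.take_left' block_len
  exact_mod_cast hcnt

-- ===== VERDICT (by name: the statement is the Claim_ definition above) =====
theorem numFullRoutes_spec : Claim_unchanged_numFullRoutes := by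
  intro lst _ hD
  rw [numFullRoutesA_eq_zero, alt_eq_zero_of_not_infix hD]

theorem numFullRoutes_changed : Claim_changed_numFullRoutes := by
  unfold Claim_changed_numFullRoutes
  refine ⟨by decide, by decide, ?_, by decide, by decide⟩
  simpa using numFullRoutesA_eq_zero pvDiffWitness_numFullRoutes

theorem numFullRoutes_tight : Claim_exact_numFullRoutes := by
  intro lst _ hD
  rw [numFullRoutesA_eq_zero]
  have := alt_pos_of_infix hD
  omega
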